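-- pv_equiv track=rewrite | github.com/pypi-data/pypi-mirror-192 | packages/BNetwork/BNetwork-0.1.tar.gz/BNetwork-0.1/bayesianNetwork/BNetwork.py | generateTableNodes
-- ===== SOURCE A (Python) =====
-- import itertools
--
-- def generateTableNodes(letters):
--         boleanos = []
--         structure = []
--         res = []
--
--         for l in letters:
--             boleanos.append([True, False])
--
--         for element in itertools.product(*boleanos):
--             structure.append(element)
--
--         for x in structure:
--             change = 0
--             newStructure = ""
--             for t in x:
--                 if t == True:
--                     newStructure+= letters[change]
--                 else:
--                     newStructure+= "-"+letters[change]
--                 change+=1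
--             res.append(newStructure)
--         return res
-- ===== SOURCE B (Python) =====
-- def generateTableNodes(letters):
--     def build(rest):
--         if not rest:
--             return ['']
--         head = rest[0]
--         suffixes = build(rest[1:])
--         return [head + s for s in suffixes] + ['-' + head + s for s in suffixes]
--     return build(list(letters))
-- ===== Notes on version B (the rewrite author's own statement) =====
-- stated objective: simpler
-- what changed: Replaces itertools.product plus a counter-indexed reformatting loop with a direct recursion on the letter list that builds the True-block and False-block of label strings per head letter.
import Mathlib
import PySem

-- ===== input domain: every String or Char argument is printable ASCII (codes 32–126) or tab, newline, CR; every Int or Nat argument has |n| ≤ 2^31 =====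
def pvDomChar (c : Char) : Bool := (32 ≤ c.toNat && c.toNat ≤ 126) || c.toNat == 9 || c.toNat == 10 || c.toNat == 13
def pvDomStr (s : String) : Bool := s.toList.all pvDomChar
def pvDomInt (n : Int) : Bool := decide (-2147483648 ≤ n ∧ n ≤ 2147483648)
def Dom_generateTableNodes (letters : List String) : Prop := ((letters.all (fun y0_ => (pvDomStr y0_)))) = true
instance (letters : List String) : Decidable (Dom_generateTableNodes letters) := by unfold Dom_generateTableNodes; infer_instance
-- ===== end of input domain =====

-- B replaces itertools.product + a counter-indexed formatting loop by a direct recursion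
-- on the letter list (objective: simpler).

-- ===== PORT A =====
-- itertools.product(*lists), ported literally as the standard left fold that extends each
-- accumulated tuple with every element of the next list (exact: same order as CPython).
def pvProdStep (acc : List (List Bool)) (l : List Bool) : List (List Bool) :=
  acc.flatMap (fun t => l.map (fun b => t ++ [b]))

-- inner loop over one tuple x: state is (change, newStructure); letters[change] is ported
-- with pyGet? (always in range here, so the getD "" default is never taken).
def pvRowStep (letters : List String) (st : Int × String) (t : Bool) : Int × String :=
  if t = true then (st.1 + 1, st.2 ++ (PySem.List.pyGet? letters st.1).getD "")
  else (st.1 + 1, (st.2 ++ "-") ++ (PySem.List.pyGet? letters st.1).getD "")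

def generateTableNodes (letters : List String) : List String :=
  let boleanos := letters.foldl (fun acc _l => acc ++ [[true, false]]) []
  let structure_ := (boleanos.foldl pvProdStep [[]]).foldl (fun acc e => acc ++ [e]) []
  structure_.foldl (fun res x => res ++ [(x.foldl (pvRowStep letters) (0, "")).2]) []

-- ===== PORT B =====
def pvBuild : List String → List String
  | [] => [""]
  | h :: rest =>
      let suffixes := pvBuild rest
      suffixes.map (fun s => h ++ s) ++ suffixes.map (fun s => ("-" ++ h) ++ s)

def generateTableNodes_alt (letters : List String) : List String := pvBuild letters

-- ===== PRECONDITION & SPEC =====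
def Spec_generateTableNodes (letters : List String) (out : List String) : Prop := out = generateTableNodes_alt letters
instance (letters : List String) (out : List String) : Decidable (Spec_generateTableNodes letters out) := by unfold Spec_generateTableNodes; infer_instance

-- ===== CLAIM (what is proved, stated in full; the proofs are below) =====
def Claim_equal_generateTableNodes : Prop := ∀ (letters : List String), Dom_generateTableNodes letters → Spec_generateTableNodes letters (generateTableNodes letters)

-- ===== LEMMAS AND PROOFS =====

-- pure version of A's inner formatting loop
def pvRowP : List String → List Bool → String
  | _, [] => ""
  | ls, b :: xs =>
      (if b then (PySem.List.pyGet? ls 0).getD "" else ("-" ++ (PySem.List.pyGet? ls 0).getD "")) ++ pvRowP ls.tail xs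

-- recursive characterisation of the product fold
def pvProdR : List (List Bool) → List (List Bool)
  | [] => [[]]
  | l :: ls => l.flatMap (fun b => (pvProdR ls).map (fun c => b :: c))

theorem pvProd_foldl (ls : List (List Bool)) (acc : List (List Bool)) :
    ls.foldl pvProdStep acc = acc.flatMap (fun t => (pvProdR ls).map (fun c => t ++ c)) := by
  induction ls generalizing acc with
  | nil => simp [pvProdR]
  | cons l rest ih =>
      simp only [List.foldl_cons, ih, pvProdR, pvProdStep]
      simp only [List.flatMap_map, List.map_flatMap, List.flatMap_assoc, List.map_map]
      simp [Function.comp_def]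

theorem pvRow_foldl (x : List Bool) (ls : List String) (k : Nat) (s : String) :
    (x.foldl (pvRowStep ls) ((k : Int), s)).2 = s ++ pvRowP (ls.drop k) x := by
  induction x generalizing ls k s with
  | nil => simp [pvRowP]
  | cons b xs ih =>
      have hget : PySem.List.pyGet? ls (k : Int) = PySem.List.pyGet? (ls.drop k) 0 := by
        rw [PySem.List.pyGet?_natCast]
        rw [show ((0:Int) = ((0:Nat):Int)) from rfl, PySem.List.pyGet?_natCast]
        simp [List.getElem?_drop]
      have htail : (ls.drop k).tail = ls.drop (k + 1) := by
        rw [← List.tail_drop]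
      rw [List.foldl_cons]
      cases b with
      | true =>
          have hstep : pvRowStep ls ((k : Int), s) true
              = (((k + 1 : Nat) : Int), s ++ (PySem.List.pyGet? ls (k : Int)).getD "") := by
            simp [pvRowStep]
          rw [hstep, ih]
          simp [pvRowP, hget, htail, String.append_assoc]
      | false =>
          have hstep : pvRowStep ls ((k : Int), s) false
              = (((k + 1 : Nat) : Int), (s ++ "-") ++ (PySem.List.pyGet? ls (k : Int)).getD "") := by
            simp [pvRowStep]
          rw [hstep, ih]
          simp [pvRowP, hget, htail, String.append_assoc]

theorem pvMain (letters : List String) :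
    (pvProdR (letters.map (fun _ => [true, false]))).map (fun x => pvRowP letters x) = pvBuild letters := by
  induction letters with
  | nil => simp [pvProdR, pvRowP, pvBuild]
  | cons h t ih =>
      simp only [List.map_cons, pvProdR, pvBuild, List.flatMap_cons, List.flatMap_nil,
        List.append_nil, List.map_append, List.map_map]
      rw [← ih]
      simp only [List.map_map]
      congr 1 <;> apply List.map_congr_left <;> intro c _ <;>
        simp [pvRowP, String.append_assoc]

-- ===== VERDICT (by name: the statement is the Claim_ definition above) =====
theorem generateTableNodes_spec : Claim_equal_generateTableNodes := by
  intro letters _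
  show generateTableNodes letters = generateTableNodes_alt letters
  unfold generateTableNodes generateTableNodes_alt
  rw [PySem.List.foldl_append_singleton_eq_map, PySem.List.foldl_append_singleton_eq_self,
    PySem.List.foldl_append_singleton_eq_map]
  simp only [List.nil_append, pvProd_foldl, List.flatMap_cons, List.flatMap_nil,
    List.append_nil]
  have hrow : ∀ x : List Bool, (x.foldl (pvRowStep letters) ((0 : Int), "")).2 = pvRowP letters x := by
    intro x
    have := pvRow_foldl x letters 0 ""
    simpa using this
  calc ((pvProdR (letters.map fun _ => [true, false])).map (fun c => [] ++ c)).map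
        (fun x => (x.foldl (pvRowStep letters) (0, "")).2)
      = (pvProdR (letters.map fun _ => [true, false])).map (fun x => pvRowP letters x) := by
        simp [hrow]
    _ = pvBuild letters := pvMain letters
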